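-- pv_equiv track=rewrite | github.com/mitock1/pipeline | refresh_precommit.py | parse_additional_options
-- ===== SOURCE A (Python) =====
-- from typing import List
--
-- def parse_additional_options(lines):
--     """split lines like --trusted-repo foo.com into separate lines"""
--     q: List[str] = []
--     for line in lines:
--         splits = line.split()
--         for split in splits:
--             if split[0] == "-":
--                 if q:
--                     yield " ".join(q)
--                     q[:] = []
--                 yield split
--             else:
--                 q.append(split)
--         if q:
--             yield " ".join(q)
--             q[:] = []
-- ===== SOURCE B (Python) =====
-- def parse_additional_options(lines):
--     """split lines like --trusted-repo foo.com into separate lines"""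
--     for line in lines:
--         toks = line.split()
--         i, n = 0, len(toks)
--         while i < n:
--             if toks[i].startswith("-"):
--                 yield toks[i]
--                 i += 1
--             else:
--                 j = i
--                 while j < n and not toks[j].startswith("-"):
--                     j += 1
--                 yield " ".join(toks[i:j])
--                 i = j
-- ===== Notes on version B (the rewrite author's own statement) =====
-- stated objective: alternative
-- what changed: Replaces the cross-token mutable buffer-and-flush accumulator with a per-line run partition: an index scan that yields dash tokens individually and joins each maximal run of non-dash tokens in one step, with no carried state.
import Mathlib
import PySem

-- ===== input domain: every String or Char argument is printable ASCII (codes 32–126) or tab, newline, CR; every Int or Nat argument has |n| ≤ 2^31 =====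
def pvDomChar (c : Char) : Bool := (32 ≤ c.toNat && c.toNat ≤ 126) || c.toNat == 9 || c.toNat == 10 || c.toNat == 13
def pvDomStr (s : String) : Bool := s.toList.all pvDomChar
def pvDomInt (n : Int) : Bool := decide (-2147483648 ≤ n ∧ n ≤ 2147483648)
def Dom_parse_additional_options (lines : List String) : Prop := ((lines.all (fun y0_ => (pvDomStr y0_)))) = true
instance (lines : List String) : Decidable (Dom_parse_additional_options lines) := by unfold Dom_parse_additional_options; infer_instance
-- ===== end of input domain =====

-- B replaces A's cross-token mutable buffer-and-flush accumulator by a per-line run partition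
-- (dash tokens emitted singly, each maximal non-dash run joined in one step, no carried state);
-- both Pythons are generators, materialised here as the list of yielded strings.

-- ===== PORT A =====
-- `split[0] == "-"`: tokens produced by str.split() are never empty, so pyGet? is always `some`
-- there; the `.getD ' '` default is unreachable on the ports' inputs.
def pvDash (t : String) : Bool := ((PySem.Str.pyGet? t 0).getD ' ') == '-'

-- the body of `for split in splits`, state (q, out)
def pvStepTok (st : List String × List String) (t : String) : List String × List String :=
  if pvDash t then
    (if st.1 ≠ [] then ([], st.2 ++ [PySem.Str.join " " st.1] ++ [t]) else (st.1, st.2 ++ [t]))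
  else (st.1 ++ [t], st.2)

-- the trailing `if q: yield " ".join(q); q[:] = []` of each line
def pvFlush (st : List String × List String) : List String × List String :=
  if st.1 ≠ [] then ([], st.2 ++ [PySem.Str.join " " st.1]) else st

def pvLineA (st : List String × List String) (line : String) : List String × List String :=
  pvFlush ((PySem.Str.split₀ line).foldl pvStepTok st)

def parse_additional_options (lines : List String) : List String :=
  (lines.foldl pvLineA ([], [])).2

-- ===== PORT B =====
-- one line of Source B: scan the tokens; a dash token is emitted alone; otherwise the inner
-- `while j < n and not toks[j].startswith("-")` scan is takeWhile/dropWhile and the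
-- run `toks[i:j]` is joined and emitted
def pvRuns : List String → List String
  | [] => []
  | t :: ts =>
    if PySem.Str.startswith t "-" then t :: pvRuns ts
    else PySem.Str.join " " (t :: ts.takeWhile (fun x => !PySem.Str.startswith x "-")) ::
         pvRuns (ts.dropWhile (fun x => !PySem.Str.startswith x "-"))
termination_by ts => ts.length
decreasing_by
  · simp only [List.length_cons]; omega
  · have := List.length_dropWhile_le (fun x => !PySem.Str.startswith x "-") ts
    simp only [List.length_cons]; omega

def parse_additional_options_alt (lines : List String) : List String :=
  lines.flatMap (fun line => pvRuns (PySem.Str.split₀ line))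

-- ===== PRECONDITION & SPEC =====
def Spec_parse_additional_options (lines : List String) (out : List String) : Prop := out = parse_additional_options_alt lines
instance (lines : List String) (out : List String) : Decidable (Spec_parse_additional_options lines out) := by unfold Spec_parse_additional_options; infer_instance

-- ===== CLAIM (what is proved, stated in full; the proofs are below) =====
def Claim_equal_parse_additional_options : Prop := ∀ (lines : List String), Dom_parse_additional_options lines → Spec_parse_additional_options lines (parse_additional_options lines)

-- ===== LEMMAS AND PROOFS =====

lemma pvRuns_nil : pvRuns [] = [] := by rw [pvRuns]

lemma pvRuns_cons (t : String) (ts : List String) : pvRuns (t :: ts) =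
    if PySem.Str.startswith t "-" then t :: pvRuns ts
    else PySem.Str.join " " (t :: ts.takeWhile (fun x => !PySem.Str.startswith x "-")) ::
         pvRuns (ts.dropWhile (fun x => !PySem.Str.startswith x "-")) := by
  rw [pvRuns]

-- A's head test and B's startswith test agree on every string (both are false on "")
lemma pvDash_eq (t : String) : pvDash t = PySem.Str.startswith t "-" := by
  simp only [pvDash, PySem.Str.pyGet?, PySem.Str.startswith]
  have h : ("-" : String).toList = ['-'] := by decide
  rw [h]
  cases t.toList with
  | nil => decide
  | cons c cs =>
    simp [PySem.Chars.pyGet?, PySem.Chars.startswith, List.isPrefixOf, PySem.List.pyGet?,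
      PySem.List.pyIdx?]
    exact eq_comm

-- one line, any buffer state: A's fold-then-flush equals B's run partition
lemma pvLine_eq (ts : List String) : ∀ (q out : List String),
    pvFlush (ts.foldl pvStepTok (q, out)) =
      ([], out ++ (if q = [] then pvRuns ts
        else PySem.Str.join " " (q ++ ts.takeWhile (fun x => !PySem.Str.startswith x "-")) ::
          pvRuns (ts.dropWhile (fun x => !PySem.Str.startswith x "-")))) := by
  induction ts with
  | nil =>
    intro q out
    rcases eq_or_ne q [] with h | h
    · simp [pvFlush, h, pvRuns_nil]
    · simp [pvFlush, h, pvRuns_nil]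
  | cons t ts ih =>
    intro q out
    cases hd : PySem.Str.startswith t "-" with
    | true =>
      rcases eq_or_ne q [] with h | h
      · subst h
        simp only [List.foldl_cons, pvStepTok, pvDash_eq, hd, reduceIte, ne_eq,
          not_true_eq_false, List.nil_append]
        rw [ih [] (out ++ [t]), pvRuns_cons, if_pos hd]
        simp
      · simp only [List.foldl_cons, pvStepTok, pvDash_eq, hd, reduceIte, ne_eq, h,
          not_false_eq_true]
        rw [ih [] (out ++ [PySem.Str.join " " q] ++ [t])]
        simp only [reduceIte, List.takeWhile_cons, List.dropWhile_cons, hd,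
          Bool.not_true, Bool.false_eq_true, pvRuns_cons, List.append_nil]
        simp
    | false =>
      rcases eq_or_ne q [] with h | h
      · subst h
        simp only [List.foldl_cons, pvStepTok, pvDash_eq, hd, Bool.false_eq_true, reduceIte,
          List.nil_append]
        rw [ih [t] out]
        have ht : ([t] : List String) ≠ [] := by simp
        simp only [reduceIte, ht, pvRuns_cons, hd, Bool.false_eq_true]
        simp
      · simp only [List.foldl_cons, pvStepTok, pvDash_eq, hd, Bool.false_eq_true, reduceIte]
        rw [ih (q ++ [t]) out]
        have hq : q ++ [t] ≠ [] := by simp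
        simp only [reduceIte, h, hq, List.takeWhile_cons, List.dropWhile_cons, hd, Bool.not_false,
          pvRuns_cons]
        simp

-- fold over the lines (pending buffer empty at each line boundary) = flatMap of per-line partitions
lemma pvLines_eq (lines : List String) : ∀ (out : List String),
    (lines.foldl pvLineA ([], out)).2 =
      out ++ lines.flatMap (fun line => pvRuns (PySem.Str.split₀ line)) := by
  induction lines with
  | nil => intro out; simp
  | cons l ls ih =>
    intro out
    simp only [List.foldl_cons, pvLineA]
    rw [pvLine_eq (PySem.Str.split₀ l) [] out]
    simp [ih, List.flatMap_cons]

-- ===== VERDICT (by name: the statement is the Claim_ definition above) =====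
theorem parse_additional_options_spec : Claim_equal_parse_additional_options := by
  intro lines _
  unfold Spec_parse_additional_options parse_additional_options parse_additional_options_alt
  simpa using pvLines_eq lines []
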